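-- pv_equiv track=rewrite | github.com/DiegoAcostaaaaa/practica7 | datos_cliente.py | separar_csv
-- ===== SOURCE A (Python) =====
-- def separar_csv(csv):
--     elemento=''
--     datos_separados=[]
--     for i in csv:
--         if i!=';' and i!='\n':
--             elemento+=i
--         elif i==';' or i=='\n':
--             datos_separados.append(elemento)
--             elemento=''
--     return datos_separados
-- ===== SOURCE B (Python) =====
-- def separar_csv(csv):
--     # Normalize both delimiters to ';', split, and drop the unterminated tail.
--     return csv.replace('\n', ';').split(';')[:-1]
-- ===== Notes on version B (the rewrite author's own statement) =====
-- stated objective: idiomatic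
-- what changed: Replaces the character-by-character accumulation loop with a library pipeline: normalize the newline delimiter to the semicolon one via str.replace, split on it, and drop the unterminated last piece with [:-1].
import Mathlib
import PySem

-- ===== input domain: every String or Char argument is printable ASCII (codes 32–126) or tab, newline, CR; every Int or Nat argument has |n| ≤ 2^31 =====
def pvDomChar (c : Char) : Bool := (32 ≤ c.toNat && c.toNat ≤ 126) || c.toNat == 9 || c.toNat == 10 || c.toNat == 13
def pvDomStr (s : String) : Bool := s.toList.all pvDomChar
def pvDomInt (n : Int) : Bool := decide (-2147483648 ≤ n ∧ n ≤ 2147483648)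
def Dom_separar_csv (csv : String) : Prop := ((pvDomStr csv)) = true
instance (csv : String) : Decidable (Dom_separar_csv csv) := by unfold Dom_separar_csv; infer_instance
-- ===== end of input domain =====

-- B replaces A's character-by-character accumulation loop with the idiomatic
-- replace-normalize / split / drop-last library pipeline (same O(n) cost).


-- ===== PORT A =====
-- elemento (the field being built) is kept as a List Char; datos_separados as List String.
def separar_csv (csv : String) : List String :=
  (csv.toList.foldl
    (fun (st : List Char × List String) i =>
      if i ≠ ';' ∧ i ≠ '\n' then (st.1 ++ [i], st.2)
      else ([], st.2 ++ [String.ofList st.1]))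
    ([], [])).2

-- ===== PORT B =====
def separar_csv_alt (csv : String) : List String :=
  PySem.List.slice
    ((PySem.Str.split? (PySem.Str.replace csv "\n" ";") ";").getD [])
    none (some (-1))

-- ===== PRECONDITION & SPEC =====
def Spec_separar_csv (csv : String) (out : List String) : Prop := out = separar_csv_alt csv
instance (csv : String) (out : List String) : Decidable (Spec_separar_csv csv out) := by unfold Spec_separar_csv; infer_instance

-- ===== CLAIM (what is proved, stated in full; the proofs are below) =====
def Claim_equal_separar_csv : Prop := ∀ (csv : String), Dom_separar_csv csv → Spec_separar_csv csv (separar_csv csv)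

-- ===== LEMMAS AND PROOFS =====

/-- `'\n' ↦ ';'`, all other characters unchanged. -/
def pvSub (c : Char) : Char := if c = '\n' then ';' else c

/-- Spec of A's loop on the remaining characters, given the field built so far. -/
def pvFieldsA : List Char → List Char → List String
  | [], _ => []
  | c :: cs, elem =>
    if c ≠ ';' ∧ c ≠ '\n' then pvFieldsA cs (elem ++ [c])
    else String.ofList elem :: pvFieldsA cs []

/-- Spec of `Chars.splitOn.go [';']` (accumulator `cur` reversed). -/
def pvSegs : List Char → List Char → List (List Char)
  | [], cur => [cur.reverse]
  | c :: cs, cur =>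
    if c = ';' then cur.reverse :: pvSegs cs []
    else pvSegs cs (c :: cur)

theorem pvSegs_ne_nil (l cur : List Char) : pvSegs l cur ≠ [] := by
  induction l generalizing cur with
  | nil => simp [pvSegs]
  | cons c cs ih =>
    simp only [pvSegs]
    split
    · simp
    · exact ih _

theorem pvReplace_go (fuel : Nat) (l acc : List Char) (h : l.length ≤ fuel) :
    PySem.Chars.replace.go ['\n'] [';'] fuel l acc = acc.reverse ++ l.map pvSub := by
  induction fuel generalizing l acc with
  | zero =>
    have : l = [] := List.eq_nil_of_length_eq_zero (Nat.le_zero.mp h)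
    subst this; simp [PySem.Chars.replace.go]
  | succ n ih =>
    cases l with
    | nil => simp [PySem.Chars.replace.go]
    | cons c t =>
      simp only [PySem.Chars.replace.go]
      by_cases hc : c = '\n'
      · subst hc
        simp only [List.isPrefixOf, BEq.rfl, Bool.true_and,
          if_pos]
        rw [ih]
        · simp [pvSub]
        · simpa using Nat.le_of_succ_le_succ h
      · have : (['\n'].isPrefixOf (c :: t)) = false := by
          simp [List.isPrefixOf, Ne.symm hc]
        rw [this]
        simp only [Bool.false_eq_true, if_false]
        rw [ih t (c :: acc) (by simpa using Nat.le_of_succ_le_succ h)]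
        simp [pvSub, hc]

theorem pvSplitOn_go (fuel : Nat) (l cur : List Char) (acc : List (List Char))
    (h : l.length ≤ fuel) :
    PySem.Chars.splitOn.go [';'] fuel l cur acc = acc.reverse ++ pvSegs l cur := by
  induction fuel generalizing l cur acc with
  | zero =>
    have : l = [] := List.eq_nil_of_length_eq_zero (Nat.le_zero.mp h)
    subst this; simp [PySem.Chars.splitOn.go, pvSegs]
  | succ n ih =>
    cases l with
    | nil => simp [PySem.Chars.splitOn.go, pvSegs]
    | cons c t =>
      simp only [PySem.Chars.splitOn.go]
      by_cases hc : c = ';'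
      · subst hc
        simp only [List.isPrefixOf, BEq.rfl, Bool.true_and,
          if_pos]
        have hdrop : List.drop [';'].length (';' :: t) = t := rfl
        rw [hdrop, ih t [] (cur.reverse :: acc) (by simpa using Nat.le_of_succ_le_succ h)]
        simp [pvSegs]
      · have : ([';'].isPrefixOf (c :: t)) = false := by
          simp [List.isPrefixOf, Ne.symm hc]
        rw [this]
        simp only [Bool.false_eq_true, if_false]
        rw [ih t (c :: cur) acc (by simpa using Nat.le_of_succ_le_succ h)]
        simp [pvSegs, hc]

theorem pvSegs_dropLast (cs elem : List Char) :
    ((pvSegs (cs.map pvSub) elem.reverse).dropLast).map String.ofList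
      = pvFieldsA cs elem := by
  induction cs generalizing elem with
  | nil => simp [pvSegs, pvFieldsA]
  | cons c cs ih =>
    by_cases hc : c ≠ ';' ∧ c ≠ '\n'
    · have hsub : pvSub c = c := by simp [pvSub, hc.2]
      simp only [List.map_cons, hsub, pvSegs, if_neg hc.1, pvFieldsA, if_pos hc]
      rw [← ih (elem ++ [c])]
      simp
    · have hsub : pvSub c = ';' := by
        rcases not_and_or.mp hc with h | h
        · simp [pvSub, not_not.mp h]
        · simp [pvSub, not_not.mp h]
      simp only [List.map_cons, hsub, pvSegs, if_true, pvFieldsA,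
        if_neg hc, List.reverse_reverse]
      rw [List.dropLast_cons_of_ne_nil (pvSegs_ne_nil _ _)]
      have h0 := ih []
      simp only [List.reverse_nil] at h0
      rw [List.map_cons, h0]

theorem pvFoldA (cs elem : List Char) (datos : List String) :
    (cs.foldl
      (fun (st : List Char × List String) i =>
        if i ≠ ';' ∧ i ≠ '\n' then (st.1 ++ [i], st.2)
        else ([], st.2 ++ [String.ofList st.1]))
      (elem, datos)).2 = datos ++ pvFieldsA cs elem := by
  induction cs generalizing elem datos with
  | nil => simp [pvFieldsA]
  | cons c cs ih =>
    by_cases hc : c ≠ ';' ∧ c ≠ '\n'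
    · simp only [List.foldl_cons, if_pos hc, pvFieldsA]
      rw [ih]
    · simp only [List.foldl_cons, if_neg hc, pvFieldsA]
      rw [ih]
      simp

-- ===== VERDICT (by name: the statement is the Claim_ definition above) =====
theorem separar_csv_spec : Claim_equal_separar_csv := by
  intro csv _
  unfold Spec_separar_csv separar_csv separar_csv_alt
  rw [pvFoldA csv.toList [] []]
  have hrep : (PySem.Str.replace csv "\n" ";").toList = csv.toList.map pvSub := by
    rw [PySem.Str.toList_replace]
    show PySem.Chars.replace csv.toList ['\n'] [';'] = _
    unfold PySem.Chars.replace
    simp only [List.isEmpty_cons, Bool.false_eq_true, if_false]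
    exact pvReplace_go _ _ _ (le_refl _)
  rw [PySem.Str.split?]
  show [] ++ pvFieldsA csv.toList [] =
    PySem.List.slice
      ((Option.map (fun x => List.map String.ofList x)
        (PySem.Chars.split? (PySem.Str.replace csv "\n" ";").toList (";".toList))).getD [])
      none (some (-1))
  rw [hrep]
  show _ = PySem.List.slice
      ((Option.map (fun x => List.map String.ofList x)
        (PySem.Chars.split? (csv.toList.map pvSub) [';'])).getD []) none (some (-1))
  unfold PySem.Chars.split?
  simp only [List.isEmpty_cons, Bool.false_eq_true, if_false, Option.map_some,
    Option.getD_some, PySem.List.slice_to_neg_one]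
  unfold PySem.Chars.splitOn
  rw [pvSplitOn_go _ _ _ _ (Nat.le_succ _)]
  rw [← List.map_dropLast]
  have h4 := pvSegs_dropLast csv.toList []
  simp only [List.reverse_nil] at h4
  simpa using h4.symm
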